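-- pv_equiv track=rewrite | github.com/endisl/coditall | src/dsa-py/Rotations.py | are_rotations
-- ===== SOURCE A (Python) =====
-- def are_rotations(str1: str, str2: str):
--     if len(str1) == 0 or len(str2) == 0 or str1 is None or str2 is None:
--         raise ValueError("Invalid arguments")
--
--     pointer1 = 0
--     pointer2 = str2.find(str1[0])
--
--     if pointer2 == -1 or len(str1) != len(str2):
--         return False
--
--     for i in range(len(str1)):
--         if str1[pointer1] != str2[pointer2]:
--             return False
--         pointer1 += 1
--         pointer2 += 1
--
--         if pointer2 == len(str2):
--             pointer2 = 0
--
--     return True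
-- ===== SOURCE B (Python) =====
-- def are_rotations(str1: str, str2: str):
--     if len(str1) == 0 or len(str2) == 0 or str1 is None or str2 is None:
--         raise ValueError("Invalid arguments")
--
--     idx = str2.find(str1[0])
--
--     if idx == -1 or len(str1) != len(str2):
--         return False
--
--     return str2[idx:] + str2[:idx] == str1
-- ===== Notes on version B (the rewrite author's own statement) =====
-- stated objective: simpler
-- what changed: Replaces A's element-by-element circular two-pointer loop with a single closed comparison: build the left-rotation of str2 at the first occurrence of str1[0] via slices and compare it to str1 once.
import Mathlib
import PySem

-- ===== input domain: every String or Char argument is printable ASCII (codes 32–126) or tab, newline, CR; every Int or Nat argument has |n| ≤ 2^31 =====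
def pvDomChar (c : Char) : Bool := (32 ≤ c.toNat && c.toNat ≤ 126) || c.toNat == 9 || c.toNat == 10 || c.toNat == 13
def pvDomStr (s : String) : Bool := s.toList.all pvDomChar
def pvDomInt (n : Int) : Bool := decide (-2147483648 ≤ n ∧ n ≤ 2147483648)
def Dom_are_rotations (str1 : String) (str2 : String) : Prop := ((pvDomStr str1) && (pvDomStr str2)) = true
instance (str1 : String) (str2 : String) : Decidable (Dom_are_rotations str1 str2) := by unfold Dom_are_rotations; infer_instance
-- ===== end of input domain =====

-- B replaces A's circular two-pointer comparison loop with one closed slice-rotation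
-- comparison at the same offset (objective: simpler); same return value on all non-empty inputs.


-- ===== PORT A =====
-- the 'for i in range(len(str1))' loop: k = iterations left, pointer1/pointer2 as in A
def areRotLoop (s1 s2 : List Char) (p1 p2 : Int) : Nat → Bool
  | 0 => true
  | k + 1 =>
    match PySem.List.pyGet? s1 p1, PySem.List.pyGet? s2 p2 with
    | some c1, some c2 =>
      if c1 ≠ c2 then false
      else
        let p1' := p1 + 1
        let p2' := p2 + 1
        let p2'' := if p2' = (s2.length : Int) then 0 else p2'
        areRotLoop s1 s2 p1' p2'' k
    | _, _ => false  -- IndexError; unreachable under A's guards (both pointers stay in range)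

def are_rotations (str1 : String) (str2 : String) : Bool :=
  let s1 := str1.toList
  let s2 := str2.toList
  match s1 with
  | [] => false  -- Python raises ValueError on empty str1/str2: excluded by Pre_
  | c :: _ =>
    let pointer2 := PySem.Chars.find s2 [c]    -- str2.find(str1[0])
    if pointer2 = -1 ∨ s1.length ≠ s2.length then false
    else areRotLoop s1 s2 0 pointer2 s1.length

-- ===== PORT B =====
def are_rotations_alt (str1 : String) (str2 : String) : Bool :=
  let s1 := str1.toList
  let s2 := str2.toList
  match s1 with
  | [] => false  -- Python raises ValueError on empty str1/str2: excluded by Pre_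
  | c :: _ =>
    let idx := PySem.Chars.find s2 [c]         -- str2.find(str1[0])
    if idx = -1 ∨ s1.length ≠ s2.length then false
    else decide (PySem.List.slice s2 (some idx) none ++ PySem.List.slice s2 none (some idx) = s1)

-- ===== PRECONDITION & SPEC =====
-- Pre_ excludes exactly the inputs where Python A raises ValueError: an empty str1 or str2.
def Pre_are_rotations (str1 : String) (str2 : String) : Prop :=
  str1.toList ≠ [] ∧ str2.toList ≠ []
instance (str1 : String) (str2 : String) : Decidable (Pre_are_rotations str1 str2) := by
  unfold Pre_are_rotations; infer_instance

def pvWitness_are_rotations : String × String := ("abc", "bca")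

def Spec_are_rotations (str1 : String) (str2 : String) (out : Bool) : Prop := out = are_rotations_alt str1 str2
instance (str1 : String) (str2 : String) (out : Bool) : Decidable (Spec_are_rotations str1 str2 out) := by unfold Spec_are_rotations; infer_instance

-- ===== CLAIM (what is proved, stated in full; the proofs are below) =====
def Claim_equal_are_rotations : Prop := ∀ (str1 : String) (str2 : String), Dom_are_rotations str1 str2 → Pre_are_rotations str1 str2 → Spec_are_rotations str1 str2 (are_rotations str1 str2)

-- ===== LEMMAS AND PROOFS =====

-- A's loop checks s1[i] against s2[(j+m) % n] index by index (pointer2 wraps at n).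
lemma areRotLoop_eq (s1 s2 : List Char) (k i j : Nat)
    (hik : i + k = s1.length) (hlen : s1.length = s2.length) (hj : j < s2.length) :
    areRotLoop s1 s2 (i : Int) (j : Int) k
      = decide (∀ m, m < k → s1[i + m]? = s2[(j + m) % s2.length]?) := by
  induction k generalizing i j with
  | zero => simp [areRotLoop]
  | succ k ih =>
    have hi : i < s1.length := by omega
    have hget1 : PySem.List.pyGet? s1 (i : Int) = some s1[i] := by
      simp [PySem.List.pyGet?_natCast, List.getElem?_eq_getElem hi]
    have hget2 : PySem.List.pyGet? s2 (j : Int) = some s2[j] := by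
      simp [PySem.List.pyGet?_natCast, List.getElem?_eq_getElem hj]
    rw [areRotLoop, hget1, hget2]
    by_cases hc : s1[i] = s2[j]
    · simp only [hc, ne_eq, not_true_eq_false, if_false]
      have hwrap : (if (j : Int) + 1 = (s2.length : Int) then (0 : Int) else (j : Int) + 1)
          = (((j + 1) % s2.length : Nat) : Int) := by
        split_ifs with h
        · have : j + 1 = s2.length := by exact_mod_cast h
          simp [this]
        · have hne : j + 1 ≠ s2.length := by
            intro hh; exact h (by exact_mod_cast hh)
          have : (j + 1) % s2.length = j + 1 := Nat.mod_eq_of_lt (by omega)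
          rw [this]; push_cast; ring
      have hcast : (i : Int) + 1 = ((i + 1 : Nat) : Int) := by push_cast; ring
      rw [hwrap, hcast, ih (i + 1) ((j + 1) % s2.length) (by omega)
        (Nat.mod_lt _ (by omega))]
      rw [decide_eq_decide]
      constructor
      · intro h m hm
        cases m with
        | zero => simpa [Nat.mod_eq_of_lt hj, List.getElem?_eq_getElem hi,
            List.getElem?_eq_getElem hj] using hc
        | succ m =>
          have := h m (by omega)
          have hmod : ((j + 1) % s2.length + m) % s2.length = (j + (m + 1)) % s2.length := by
            conv_rhs => rw [show j + (m + 1) = (j + 1) + m by ring, Nat.add_mod]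
            rw [Nat.add_mod ((j+1) % s2.length) m, Nat.mod_mod_of_dvd]
            exact dvd_refl _
          rw [show i + (m + 1) = (i + 1) + m by ring, hmod.symm]
          exact this
      · intro h m hm
        have := h (m + 1) (by omega)
        have hmod : ((j + 1) % s2.length + m) % s2.length = (j + (m + 1)) % s2.length := by
          conv_rhs => rw [show j + (m + 1) = (j + 1) + m by ring, Nat.add_mod]
          rw [Nat.add_mod ((j+1) % s2.length) m, Nat.mod_mod_of_dvd]
          exact dvd_refl _
        rw [show (i + 1) + m = i + (m + 1) by ring, hmod]
        exact this
    · simp only [hc, ne_eq, not_false_eq_true, if_true]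
      symm
      rw [decide_eq_false_iff_not]
      intro h
      have := h 0 (by omega)
      simp [Nat.mod_eq_of_lt hj, List.getElem?_eq_getElem hi,
        List.getElem?_eq_getElem hj] at this
      exact hc this

-- the rotation-by-slices comparison says exactly the same thing, pointwise
lemma rotate_eq_iff (s1 s2 : List Char) (j : Nat)
    (hlen : s1.length = s2.length) (hj : j < s2.length) :
    (s2.drop j ++ s2.take j = s1)
      ↔ (∀ m, m < s1.length → s1[m]? = s2[(j + m) % s2.length]?) := by
  rw [← List.rotate_eq_drop_append_take (le_of_lt hj)]
  constructor
  · intro h m hm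
    subst h
    have hm2 : m < (s2.rotate j).length := by simpa [List.length_rotate] using hm
    rw [List.getElem?_eq_getElem hm2,
      List.getElem?_eq_getElem (show (j + m) % s2.length < s2.length from Nat.mod_lt _ (by omega))]
    rw [List.getElem_rotate s2 j m hm2]
    simp [Nat.add_comm j m]
  · intro h
    apply List.ext_getElem?
    intro m
    by_cases hm : m < s1.length
    · have hm2 : m < (s2.rotate j).length := by simp [List.length_rotate]; omega
      rw [List.getElem?_eq_getElem hm2, h m hm,
        List.getElem?_eq_getElem (show (j + m) % s2.length < s2.length from Nat.mod_lt _ (by omega))]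
      rw [List.getElem_rotate s2 j m hm2]
      simp [Nat.add_comm j m]
    · rw [List.getElem?_eq_none (by simp [List.length_rotate]; omega),
        List.getElem?_eq_none (Nat.le_of_not_lt hm)]

-- ===== VERDICT (by name: the statement is the Claim_ definition above) =====
theorem are_rotations_spec : Claim_equal_are_rotations := by
  intro str1 str2 _ hpre
  unfold Spec_are_rotations are_rotations are_rotations_alt
  obtain ⟨h1, _⟩ := hpre
  cases hs1 : str1.toList with
  | nil => exact absurd hs1 h1
  | cons c rest =>
    simp only
    set s1 : List Char := c :: rest with hs1def
    set s2 : List Char := str2.toList with hs2def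
    set idx := PySem.Chars.find s2 [c] with hidx
    by_cases hguard : idx = -1 ∨ s1.length ≠ s2.length
    · simp [hguard]
    · simp only [hguard, if_false]
      rw [not_or] at hguard
      obtain ⟨hne, hlen'⟩ := hguard
      have hlen : s1.length = s2.length := by omega
      have h0 : (0 : Int) ≤ idx := by
        have := PySem.Chars.neg_one_le_find s2 [c]
        omega
      have hspec := PySem.Chars.find_spec (s := s2) (sub := [c]) h0
      have hlt : idx.toNat < s2.length := by
        rcases hspec.1 with ⟨t, ht⟩
        have hle : idx ≤ (s2.length : Int) := PySem.Chars.find_le_length s2 [c]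
        have : (s2.drop idx.toNat).length ≠ 0 := by
          rw [← ht]; simp
        simp [List.length_drop] at this
        omega
      have hcast : idx = ((idx.toNat : Nat) : Int) := by omega
      have hloop := areRotLoop_eq s1 s2 s1.length 0 idx.toNat (by omega) hlen hlt
      simp only [Nat.cast_zero, Nat.zero_add] at hloop
      rw [hcast, hloop, PySem.List.slice_from_natCast, PySem.List.slice_to_natCast,
        decide_eq_decide]
      exact (rotate_eq_iff s1 s2 idx.toNat hlen hlt).symm
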